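-- pv_equiv track=rewrite | github.com/louspringer/tidb-agentx-hackathon | aggressive_syntax_fixer.py | is_in_function_context
-- ===== SOURCE A (Python) =====
-- from typing import List, Dict, Any
--
-- def is_in_function_context(line_num: int, all_lines: List[str]) -> bool:
--     """Check if we're inside a function or class definition"""
--     for i in range(line_num - 1, -1, -1):
--         line = all_lines[i].strip()
--         if line.startswith(('def ', 'class ')):
--             return True
--         elif line.startswith(('import ', 'from ')):
--             return False
--     return False
-- ===== SOURCE B (Python) =====
-- def is_in_function_context(line_num, all_lines):
--     """Check if we're inside a function or class definition.
--
--     Staged passes: slice the lines before line_num, keep a True/False mark for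
--     each def/class vs import/from line, then return the last mark (False if none).
--     """
--     marks = [line.strip().startswith(('def ', 'class '))
--              for line in all_lines[:max(line_num, 0)]
--              if line.strip().startswith(('def ', 'class ', 'import ', 'from '))]
--     return marks[-1] if marks else False
-- ===== Notes on version B (the rewrite author's own statement) =====
-- stated objective: alternative
-- what changed: B replaces A's backward index loop with early returns by three staged passes: slice the prefix before line_num, a filtering comprehension that maps each relevant line to a True/False mark, and taking the last mark (False if none).
import Mathlib
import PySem

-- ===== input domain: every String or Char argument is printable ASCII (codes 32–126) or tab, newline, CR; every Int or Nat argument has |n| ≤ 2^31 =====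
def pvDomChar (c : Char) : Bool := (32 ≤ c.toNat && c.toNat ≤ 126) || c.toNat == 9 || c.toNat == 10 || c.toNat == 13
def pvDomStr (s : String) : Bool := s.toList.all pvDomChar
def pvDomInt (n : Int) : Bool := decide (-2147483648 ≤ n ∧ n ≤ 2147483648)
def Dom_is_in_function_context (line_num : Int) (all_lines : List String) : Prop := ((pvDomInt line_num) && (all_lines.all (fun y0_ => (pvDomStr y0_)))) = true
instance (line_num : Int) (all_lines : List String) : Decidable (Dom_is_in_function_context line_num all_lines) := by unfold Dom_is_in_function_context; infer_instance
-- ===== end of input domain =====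

-- B replaces A's backward index loop with early returns by staged passes (slice the prefix,
-- a filtering comprehension of True/False marks, last mark wins); objective: alternative.


-- ===== PORT A =====
-- A's backward loop with early return, as structural recursion over the index list.
def pvAScan (all_lines : List String) : List Int → Bool
  | [] => false
  | i :: rest =>
    match PySem.List.pyGet? all_lines i with
    | none => false      -- IndexError in Python; excluded by Pre_
    | some s =>
      let line := PySem.Str.strip s
      if PySem.Str.startswith line "def " || PySem.Str.startswith line "class " then true
      else if PySem.Str.startswith line "import " || PySem.Str.startswith line "from " then false
      else pvAScan all_lines rest

def is_in_function_context (line_num : Int) (all_lines : List String) : Bool :=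
  pvAScan all_lines (PySem.List.pyRange (line_num - 1) (-1) (-1))

-- ===== PORT B =====
-- The comprehension's filter-and-map on one line: some mark iff the line is relevant.
def pvBMark (s : String) : Option Bool :=
  let line := PySem.Str.strip s
  if PySem.Str.startswith line "def " || PySem.Str.startswith line "class "
      || PySem.Str.startswith line "import " || PySem.Str.startswith line "from " then
    some (PySem.Str.startswith line "def " || PySem.Str.startswith line "class ")
  else none

-- marks = [... for line in all_lines[:max(line_num, 0)] if ...]; marks[-1] if marks else False
def is_in_function_context_alt (line_num : Int) (all_lines : List String) : Bool :=
  (((PySem.List.slice all_lines none (some (max line_num 0))).filterMap pvBMark).getLast?).getD false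

-- ===== PRECONDITION & SPEC =====
-- Pre_ excludes exactly the inputs where Python A raises IndexError (line_num beyond the list).
def Pre_is_in_function_context (line_num : Int) (all_lines : List String) : Prop :=
  line_num ≤ (all_lines.length : Int)
instance (line_num : Int) (all_lines : List String) : Decidable (Pre_is_in_function_context line_num all_lines) := by unfold Pre_is_in_function_context; infer_instance
def pvWitness_is_in_function_context : Int × List String := (2, ["def f():", "    x = 1"])

def Spec_is_in_function_context (line_num : Int) (all_lines : List String) (out : Bool) : Prop := out = is_in_function_context_alt line_num all_lines
instance (line_num : Int) (all_lines : List String) (out : Bool) : Decidable (Spec_is_in_function_context line_num all_lines out) := by unfold Spec_is_in_function_context; infer_instance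

-- ===== CLAIM (what is proved, stated in full; the proofs are below) =====
def Claim_equal_is_in_function_context : Prop := ∀ (line_num : Int) (all_lines : List String), Dom_is_in_function_context line_num all_lines → Pre_is_in_function_context line_num all_lines → Spec_is_in_function_context line_num all_lines (is_in_function_context line_num all_lines)

-- ===== LEMMAS AND PROOFS =====
-- Classification of one index i (in range): pvBMark of the line there.
def pvCls (all_lines : List String) (i : Int) : Option Bool :=
  match PySem.List.pyGet? all_lines i with
  | none => none
  | some s => pvBMark s

-- pvBMark written as the two-way branch that mirrors A's branch order.
theorem pvBMark_eq (s : String) :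
    pvBMark s =
      (if PySem.Str.startswith (PySem.Str.strip s) "def " || PySem.Str.startswith (PySem.Str.strip s) "class " then some true
       else if PySem.Str.startswith (PySem.Str.strip s) "import " || PySem.Str.startswith (PySem.Str.strip s) "from " then some false
       else none) := by
  simp only [pvBMark]
  cases PySem.Str.startswith (PySem.Str.strip s) "def " <;>
    cases PySem.Str.startswith (PySem.Str.strip s) "class " <;>
      cases PySem.Str.startswith (PySem.Str.strip s) "import " <;>
        cases PySem.Str.startswith (PySem.Str.strip s) "from " <;> rfl

theorem pvAScan_eq_head (xs : List String) (S : List Int)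
    (h : ∀ i ∈ S, (PySem.List.pyGet? xs i).isSome) :
    pvAScan xs S = ((S.filterMap (pvCls xs)).head?).getD false := by
  induction S with
  | nil => rfl
  | cons i rest ih =>
    have hi : (PySem.List.pyGet? xs i).isSome := h i (by simp)
    obtain ⟨s, hs⟩ := Option.isSome_iff_exists.mp hi
    have ih' := ih (fun j hj => h j (by simp [hj]))
    have hc : pvCls xs i
        = (if PySem.Str.startswith (PySem.Str.strip s) "def " || PySem.Str.startswith (PySem.Str.strip s) "class " then some true
           else if PySem.Str.startswith (PySem.Str.strip s) "import " || PySem.Str.startswith (PySem.Str.strip s) "from " then some false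
           else none) := by
      simp only [pvCls, hs, pvBMark_eq]
    simp only [pvAScan, hs]
    rw [List.filterMap_cons, hc]
    split_ifs with h1 h2 <;> simp [ih']

theorem pvRange_cls_eq_take (xs : List String) (m : Nat) (hm : m ≤ xs.length) :
    (List.range m).filterMap (fun (k : Nat) => pvCls xs (k : Int)) = (xs.take m).filterMap pvBMark := by
  induction m with
  | zero => simp
  | succ m ih =>
    have hlt : m < xs.length := by omega
    rw [List.range_succ, List.take_succ]
    rw [List.filterMap_append, List.filterMap_append, ih (by omega)]
    have hg : PySem.List.pyGet? xs ((m : Nat) : Int) = some xs[m] := by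
      rw [PySem.List.pyGet?_natCast]
      exact List.getElem?_eq_getElem hlt
    simp only [List.filterMap_cons, List.filterMap_nil, pvCls, hg]
    simp [List.getElem?_eq_getElem hlt, List.filterMap_cons]

-- ===== VERDICT (by name: the statement is the Claim_ definition above) =====
theorem is_in_function_context_spec : Claim_equal_is_in_function_context := by
  intro line_num all_lines _hDom hPre
  unfold Pre_is_in_function_context at hPre
  unfold Spec_is_in_function_context is_in_function_context is_in_function_context_alt
  by_cases hn : line_num ≤ 0
  · rw [PySem.List.pyRange_neg_one_eq_nil (by omega)]
    have : max line_num 0 = (0 : Int) := by omega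
    rw [this, PySem.List.slice_to _ le_rfl]
    rfl
  · push_neg at hn
    have hmax : max line_num 0 = line_num := by omega
    have hrev : PySem.List.pyRange (line_num - 1) (-1) (-1)
        = (PySem.List.pyRange 0 line_num 1).reverse := by
      rw [PySem.List.pyRange_neg_one_eq_reverse]; norm_num
    have hmem : ∀ i ∈ (PySem.List.pyRange 0 line_num 1).reverse,
        (PySem.List.pyGet? all_lines i).isSome := by
      intro i hi
      rw [List.mem_reverse, PySem.List.mem_pyRange_one] at hi
      rw [Option.isSome_iff_ne_none]
      intro hnone
      rw [PySem.List.pyGet?_eq_none_iff] at hnone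
      exact hnone (by simp only [PySem.Raise.InRange]; omega)
    rw [hrev, pvAScan_eq_head all_lines _ hmem, hmax,
        PySem.List.slice_to _ (by omega)]
    have hrange : PySem.List.pyRange 0 line_num 1
        = (List.range line_num.toNat).map (fun (k : Nat) => (k : Int)) := by
      rw [PySem.List.pyRange_one]; simp only [zero_add, Int.sub_zero]
    rw [List.filterMap_reverse, List.head?_reverse, hrange, List.filterMap_map]
    have := pvRange_cls_eq_take all_lines line_num.toNat (by omega)
    simp only [Function.comp] at this ⊢
    rw [this]
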